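-- pv_equiv track=rewrite | github.com/varioustoxins/NEF-Pipelines | src/nef_pipelines/lib/namespace_lib.py | if_separator_conflicts_get_message
-- ===== SOURCE A (Python) =====
-- from typing import Dict, List, Optional, Tuple, Union
--
-- def if_separator_conflicts_get_message(
--     names: List[str], separators: List[str], use_escapes: bool
-- ) -> Optional[Tuple[List[str], List[str], List[Tuple[str, str]]]]:
--     """
--     Check if any separator characters appear in names without escape flag enabled.
--
--     Args:
--         names: List of names to check
--         separators: List of separator characters to check for
--         use_escapes: If True, escapes are enabled so no error
--
--     Returns:
--         Tuple of (conflicting_names, found_separators, escape_sequences) if conflicts found,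
--         None if no conflicts or escapes enabled.
--         - conflicting_names: List of names containing separators (up to 5, with count if more)
--         - found_separators: List of separator characters that were found
--         - escape_sequences: List of (separator, escape) tuples for building help message
--     """
--     result = None
--
--     if not use_escapes:
--         conflicts = []
--         for name in names:
--             for sep in separators:
--                 if sep in name:
--                     conflicts.append((name, sep))
--
--         if conflicts:
--             # Get unique separators that were actually found in names
--             found_separators = sorted(set(sep for _, sep in conflicts))
--
--             # Get conflicting names (up to 5)
--             unique_names = []
--             seen = set()
--             for name, _ in conflicts:
--                 if name not in seen:
--                     unique_names.append(name)
--                     seen.add(name)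
--                 if len(unique_names) >= 5:
--                     break
--
--             # Build escape sequence info for found separators
--             escape_sequences = [(sep, f"{sep}{sep}") for sep in found_separators]
--
--             result = (unique_names, found_separators, escape_sequences)
--
--     return result
-- ===== SOURCE B (Python) =====
-- from typing import List, Optional, Tuple
--
--
-- def if_separator_conflicts_get_message(
--     names: List[str], separators: List[str], use_escapes: bool
-- ) -> Optional[Tuple[List[str], List[str], List[Tuple[str, str]]]]:
--     if use_escapes:
--         return None
--
--     conflicting_names: List[str] = []
--     seen = set()
--     found = set()
--     for name in names:
--         for sep in separators:
--             if sep in name: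
--                 found.add(sep)
--                 if name not in seen and len(conflicting_names) < 5:
--                     conflicting_names.append(name)
--                     seen.add(name)
--
--     if not found:
--         return None
--
--     found_sorted = sorted(found)
--     return (conflicting_names, found_sorted, [(s, s + s) for s in found_sorted])
-- ===== Notes on version B (the rewrite author's own statement) =====
-- stated objective: simpler
-- what changed: B drops A's intermediate list of (name, sep) conflict pairs and its three post-passes (set comprehension, capped dedup loop with break, escape-sequence build): it folds over the names once, maintaining the found-separator set, the seen-name set and the capped conflicting-name list directly, then formats the result.
import Mathlib
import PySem

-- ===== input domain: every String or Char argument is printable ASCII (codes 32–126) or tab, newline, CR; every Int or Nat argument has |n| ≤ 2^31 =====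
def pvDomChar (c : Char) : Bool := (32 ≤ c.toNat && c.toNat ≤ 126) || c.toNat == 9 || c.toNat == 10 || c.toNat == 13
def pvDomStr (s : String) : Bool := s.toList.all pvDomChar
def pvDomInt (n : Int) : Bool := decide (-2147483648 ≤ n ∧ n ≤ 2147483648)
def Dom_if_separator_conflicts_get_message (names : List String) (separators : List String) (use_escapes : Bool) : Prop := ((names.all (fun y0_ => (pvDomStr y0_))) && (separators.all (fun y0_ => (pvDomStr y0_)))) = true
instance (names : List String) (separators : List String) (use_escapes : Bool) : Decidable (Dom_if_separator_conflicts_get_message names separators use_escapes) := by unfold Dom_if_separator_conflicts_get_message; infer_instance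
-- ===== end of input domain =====

-- B replaces A's intermediate conflict-pair list and three post-passes by one fold over the names
-- that maintains the found-separator set, the seen-name set and the capped name list directly (simpler).


-- ===== PORT A =====
-- A's 'for name, _ in conflicts' dedup loop with its 'if len(unique_names) >= 5: break'
def pvAUniqLoop : List (String × String) → List String → PySem.Set String → List String
  | [], unique_names, _ => unique_names
  | (name, _) :: rest, unique_names, seen =>
    let st :=
      if !(PySem.Set.contains seen name) then (unique_names ++ [name], PySem.Set.add seen name)
      else (unique_names, seen)
    if 5 ≤ st.1.length then st.1 else pvAUniqLoop rest st.1 st.2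

def if_separator_conflicts_get_message (names : List String) (separators : List String) (use_escapes : Bool) : Option (List String × List String × (List (String × String))) :=
  if !use_escapes then
    let conflicts : List (String × String) :=
      names.foldl (fun conflicts name =>
        separators.foldl (fun conflicts sep =>
          if PySem.Str.isIn sep name then conflicts ++ [(name, sep)] else conflicts) conflicts) []
    if conflicts ≠ [] then
      let found_separators :=
        PySem.List.sorted (PySem.Set.ofList (conflicts.map (fun p => p.2))) (fun x => x) false
      let unique_names := pvAUniqLoop conflicts [] PySem.Set.empty
      -- f"{sep}{sep}" ported as join of the two pieces (kernel-reducible string concatenation)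
      let escape_sequences := found_separators.map (fun sep => (sep, PySem.Str.join "" [sep, sep]))
      some (unique_names, found_separators, escape_sequences)
    else none
  else none

-- ===== PORT B =====
def if_separator_conflicts_get_message_alt (names : List String) (separators : List String) (use_escapes : Bool) : Option (List String × List String × (List (String × String))) :=
  if use_escapes then none
  else
    -- state: (conflicting_names, seen, found)
    let st := names.foldl (fun st name =>
        separators.foldl (fun st sep =>
          if PySem.Str.isIn sep name then
            let found := PySem.Set.add st.2.2 sep
            if !(PySem.Set.contains st.2.1 name) && decide (st.1.length < 5) then
              (st.1 ++ [name], PySem.Set.add st.2.1 name, found)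
            else (st.1, st.2.1, found)
          else st) st)
      (([], PySem.Set.empty, PySem.Set.empty) : List String × PySem.Set String × PySem.Set String)
    if st.2.2 = [] then none
    else
      let found_sorted := PySem.List.sorted st.2.2 (fun x => x) false
      some (st.1, found_sorted, found_sorted.map (fun s => (s, PySem.Str.join "" [s, s])))

-- ===== PRECONDITION & SPEC =====
def Spec_if_separator_conflicts_get_message (names : List String) (separators : List String) (use_escapes : Bool) (out : Option (List String × List String × (List (String × String)))) : Prop := out = if_separator_conflicts_get_message_alt names separators use_escapes
instance (names : List String) (separators : List String) (use_escapes : Bool) (out : Option (List String × List String × (List (String × String)))) : Decidable (Spec_if_separator_conflicts_get_message names separators use_escapes out) := by unfold Spec_if_separator_conflicts_get_message; infer_instance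

-- ===== CLAIM (what is proved, stated in full; the proofs are below) =====
def Claim_equal_if_separator_conflicts_get_message : Prop := ∀ (names : List String) (separators : List String) (use_escapes : Bool), Dom_if_separator_conflicts_get_message names separators use_escapes → Spec_if_separator_conflicts_get_message names separators use_escapes (if_separator_conflicts_get_message names separators use_escapes)

-- ===== LEMMAS AND PROOFS =====

-- proof-side view of B's matched-pair step on the state (conflicting_names, seen, found)
def pvStep (st : List String × PySem.Set String × PySem.Set String) (p : String × String) :
    List String × PySem.Set String × PySem.Set String :=
  let found := PySem.Set.add st.2.2 p.2
  if !(PySem.Set.contains st.2.1 p.1) && decide (st.1.length < 5) then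
    (st.1 ++ [p.1], PySem.Set.add st.2.1 p.1, found)
  else (st.1, st.2.1, found)

-- the (name, sep) conflict pairs one name contributes
def pvPairs (separators : List String) (name : String) : List (String × String) :=
  (separators.filter (fun sep => PySem.Str.isIn sep name)).map (fun sep => (name, sep))

theorem pvA_conflicts_eq (separators : List String) :
    ∀ (names : List String) (acc : List (String × String)),
      names.foldl (fun conflicts name =>
        separators.foldl (fun conflicts sep =>
          if PySem.Str.isIn sep name then conflicts ++ [(name, sep)] else conflicts) conflicts) acc
      = acc ++ names.flatMap (pvPairs separators) := by
  intro names
  induction names with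
  | nil => intro acc; simp
  | cons n rest ih =>
    intro acc
    simp only [List.foldl_cons, List.flatMap_cons]
    rw [PySem.List.foldl_append_if (fun sep => PySem.Str.isIn sep n) (fun sep => (n, sep)), ih]
    simp [pvPairs]

theorem pvB_inner_eq (name : String) :
    ∀ (separators : List String) (st : List String × PySem.Set String × PySem.Set String),
      separators.foldl (fun st sep =>
          if PySem.Str.isIn sep name then
            let found := PySem.Set.add st.2.2 sep
            if !(PySem.Set.contains st.2.1 name) && decide (st.1.length < 5) then
              (st.1 ++ [name], PySem.Set.add st.2.1 name, found)
            else (st.1, st.2.1, found)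
          else st) st
      = (pvPairs separators name).foldl pvStep st := by
  intro separators
  induction separators with
  | nil => intro st; simp [pvPairs]
  | cons s rest ih =>
    intro st
    by_cases h : PySem.Str.isIn s name
    · simp only [List.foldl_cons, pvPairs, List.filter_cons, h, ih]
      rfl
    · simp only [List.foldl_cons, pvPairs, List.filter_cons, h, ih]
      simp

theorem pvB_fold_eq (separators : List String) :
    ∀ (names : List String) (st : List String × PySem.Set String × PySem.Set String),
      names.foldl (fun st name =>
        separators.foldl (fun st sep =>
          if PySem.Str.isIn sep name then
            let found := PySem.Set.add st.2.2 sep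
            if !(PySem.Set.contains st.2.1 name) && decide (st.1.length < 5) then
              (st.1 ++ [name], PySem.Set.add st.2.1 name, found)
            else (st.1, st.2.1, found)
          else st) st) st
      = (names.flatMap (pvPairs separators)).foldl pvStep st := by
  intro names
  induction names with
  | nil => intro st; simp
  | cons n rest ih =>
    intro st
    simp only [List.foldl_cons, List.flatMap_cons, List.foldl_append]
    rw [pvB_inner_eq, ih]

-- found component: pvStep always just adds the pair's separator
theorem pvStep_found (cs : List (String × String)) :
    ∀ (st : List String × PySem.Set String × PySem.Set String),
      (cs.foldl pvStep st).2.2 = (cs.map (fun p => p.2)).foldl PySem.Set.add st.2.2 := by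
  induction cs with
  | nil => intro st; rfl
  | cons c rest ih =>
    intro st
    simp only [List.foldl_cons, List.map_cons, ih]
    unfold pvStep
    split_ifs <;> rfl

-- once 5 names are collected, pvStep never changes the name list or the seen set
theorem pvStep_capped (cs : List (String × String)) :
    ∀ (st : List String × PySem.Set String × PySem.Set String), 5 ≤ st.1.length →
      (cs.foldl pvStep st).1 = st.1 ∧ (cs.foldl pvStep st).2.1 = st.2.1 := by
  induction cs with
  | nil => intro st _; exact ⟨rfl, rfl⟩
  | cons c rest ih =>
    intro st h5
    simp only [List.foldl_cons]
    have : pvStep st c = (st.1, st.2.1, PySem.Set.add st.2.2 c.2) := by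
      unfold pvStep
      have : decide (st.1.length < 5) = false := by simp; omega
      simp [this]
    rw [this]
    exact ih _ h5

theorem pvAUniqLoop_eq_fold (cs : List (String × String)) :
    ∀ (u : List String) (seen f : PySem.Set String), u.length < 5 →
      pvAUniqLoop cs u seen = (cs.foldl pvStep (u, seen, f)).1 := by
  induction cs with
  | nil => intro u seen f _; rfl
  | cons c rest ih =>
    intro u seen f h5
    obtain ⟨n, s⟩ := c
    simp only [List.foldl_cons]
    by_cases hm : n ∈ seen
    · have hstep : pvStep (u, seen, f) (n, s) = (u, seen, PySem.Set.add f s) := by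
        simp [pvStep, hm]
      have h5' : ¬ 5 ≤ u.length := by omega
      rw [hstep, ← ih u seen _ h5]
      simp [pvAUniqLoop, hm, h5']
    · have hlt : u.length < 5 := h5
      have hstep : pvStep (u, seen, f) (n, s) = (u ++ [n], PySem.Set.add seen n, PySem.Set.add f s) := by
        simp [pvStep, hm, hlt]
      rw [hstep]
      have hcb : (!PySem.Set.contains seen n) = true := by simp [hm]
      by_cases h4 : 5 ≤ (u ++ [n]).length
      · rw [(pvStep_capped rest (u ++ [n], PySem.Set.add seen n, PySem.Set.add f s) (by simpa using h4)).1]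
        simp only [pvAUniqLoop]
        rw [if_pos hcb, if_pos h4]
      · rw [← ih (u ++ [n]) (PySem.Set.add seen n) (PySem.Set.add f s) (by simp at h4 ⊢; omega)]
        simp only [pvAUniqLoop]
        rw [if_pos hcb, if_neg h4]

theorem pvOfList_eq_nil_iff {α : Type} [BEq α] [LawfulBEq α] (l : List α) :
    PySem.Set.ofList l = [] ↔ l = [] := by
  cases l with
  | nil => simp
  | cons x xs =>
    constructor
    · intro h
      have hx : x ∈ PySem.Set.ofList (x :: xs) := by
        rw [PySem.Set.mem_ofList]; exact List.mem_cons_self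
      rw [h] at hx
      cases hx
    · intro h; cases h

-- ===== VERDICT (by name: the statement is the Claim_ definition above) =====
theorem if_separator_conflicts_get_message_spec : Claim_equal_if_separator_conflicts_get_message := by
  intro names separators use_escapes _dom
  unfold Spec_if_separator_conflicts_get_message
  unfold if_separator_conflicts_get_message if_separator_conflicts_get_message_alt
  cases use_escapes with
  | true => rfl
  | false =>
    simp only [Bool.not_false, if_true, Bool.false_eq_true, if_false]
    rw [pvA_conflicts_eq, pvB_fold_eq]
    simp only [List.nil_append]
    generalize names.flatMap (pvPairs separators) = cs
    have hfound : (cs.foldl pvStep ([], PySem.Set.empty, PySem.Set.empty)).2.2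
        = PySem.Set.ofList (cs.map (fun p => p.2)) := by
      rw [pvStep_found, PySem.Set.ofList_eq_foldl]; rfl
    have hnames : (cs.foldl pvStep ([], PySem.Set.empty, PySem.Set.empty)).1
        = pvAUniqLoop cs [] PySem.Set.empty := by
      exact (pvAUniqLoop_eq_fold cs [] PySem.Set.empty PySem.Set.empty (by simp)).symm
    by_cases hnil : cs = []
    · subst hnil
      simp [PySem.Set.empty]
    · have hne : cs.map (fun p => p.2) ≠ [] := by simpa using hnil
      have hfne : ¬ (cs.foldl pvStep ([], PySem.Set.empty, PySem.Set.empty)).2.2 = [] := by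
        rw [hfound]
        intro h
        exact hne ((pvOfList_eq_nil_iff _).mp h)
      rw [if_pos hnil, if_neg hfne, hfound, hnames]
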